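-- pv_equiv track=rewrite | github.com/daveisagit/oeis | hex_grid/connected_nodes.py | normalise_position
-- ===== SOURCE A (Python) =====
-- from operator import add, sub
--
-- cube_vectors = [
--     (1, 0, -1),
--     (1, -1, 0),
--     (0, -1, 1),
--     (-1, 0, 1),
--     (-1, 1, 0),
--     (0, 1, -1),
-- ]
--
-- def scalar_multiply(v, s):
--     return tuple(x * s for x in v)
--
-- def normalise_position(points):
--     """Translate the pattern to the top left in a consistent fashion
--     This will allow us to identify a unique pattern by its coordinate set"""
--     min_r = min(p[1] for p in points)
--     v = scalar_multiply(cube_vectors[1], min_r)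
--     points = translate_points(points, v)
--
--     min_c = min(p[0] for p in points if p[1] == 0)
--     v = scalar_multiply(cube_vectors[3], min_c)
--     points = translate_points(points, v)
--
--     return points
--
-- def translate_points(points, vector):
--     """Translate all point by the given vector"""
--     return tuple(tuple(map(add, p, vector)) for p in points)
-- ===== SOURCE B (Python) =====
-- def normalise_position(points):
--     """Translate the pattern to the top left in a consistent fashion.
--     Anchor algorithm: find the lexicographically smallest (row, col) pair
--     in one pass and re-express every point relative to that anchor."""
--     ay, ax = min((p[1], p[0]) for p in points)
--     return tuple((x - ax, y - ay, z + ax + ay) for x, y, z in points)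
-- ===== Notes on version B (the rewrite author's own statement) =====
-- stated objective: alternative
-- what changed: B replaces the two staged minima and the two translate_points passes by an anchor algorithm: one lexicographic min over (row, col) pairs picks an anchor point, and every point is re-expressed relative to that anchor in a single comprehension.
import Mathlib
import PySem

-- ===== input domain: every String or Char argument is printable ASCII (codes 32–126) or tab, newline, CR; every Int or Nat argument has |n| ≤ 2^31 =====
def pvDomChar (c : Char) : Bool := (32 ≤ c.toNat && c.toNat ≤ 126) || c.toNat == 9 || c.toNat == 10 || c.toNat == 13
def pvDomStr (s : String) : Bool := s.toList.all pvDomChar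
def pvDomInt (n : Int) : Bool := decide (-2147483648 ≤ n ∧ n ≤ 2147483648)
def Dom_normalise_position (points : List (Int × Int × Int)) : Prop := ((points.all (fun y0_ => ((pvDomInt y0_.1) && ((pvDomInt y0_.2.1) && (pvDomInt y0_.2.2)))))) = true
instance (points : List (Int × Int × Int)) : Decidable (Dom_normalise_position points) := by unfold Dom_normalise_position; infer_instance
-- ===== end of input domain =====

-- B anchors on the lexicographically smallest (row, col) point found in one pass and
-- re-expresses every point relative to that anchor (alternative: no staged minima or translate passes).


-- ===== PORT A =====
def cube_vectors : List (Int × Int × Int) :=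
  [(1, 0, -1), (1, -1, 0), (0, -1, 1), (-1, 0, 1), (-1, 1, 0), (0, 1, -1)]

def scalar_multiply (v : Int × Int × Int) (s : Int) : Int × Int × Int :=
  (v.1 * s, v.2.1 * s, v.2.2 * s)

def translate_points (points : List (Int × Int × Int)) (vector : Int × Int × Int) :
    List (Int × Int × Int) :=
  points.map (fun p => (p.1 + vector.1, p.2.1 + vector.2.1, p.2.2 + vector.2.2))

def normalise_position (points : List (Int × Int × Int)) : List (Int × Int × Int) :=
  let min_r := (PySem.List.min? (points.map (fun p => p.2.1)) (fun x => x)).getD 0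
  let v := scalar_multiply ((PySem.List.pyGet? cube_vectors 1).getD (0, 0, 0)) min_r
  let points1 := translate_points points v
  let min_c := (PySem.List.min? ((points1.filter (fun p => p.2.1 == 0)).map (fun p => p.1)) (fun x => x)).getD 0
  let v2 := scalar_multiply ((PySem.List.pyGet? cube_vectors 3).getD (0, 0, 0)) min_c
  translate_points points1 v2

-- ===== PORT B =====
-- min over generated (row, col) int pairs is Python's lexicographic min: PySem.List.min2?
def normalise_position_alt (points : List (Int × Int × Int)) : List (Int × Int × Int) :=
  match PySem.List.min2? (points.map (fun p => (p.2.1, p.1))) Prod.fst Prod.snd with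
  | none => []   -- unreachable under Pre_: Python's min raises ValueError on an empty sequence
  | some (ay, ax) => points.map (fun p => (p.1 - ax, p.2.1 - ay, p.2.2 + ax + ay))

-- ===== PRECONDITION & SPEC =====
-- Python's min() raises ValueError on an empty sequence, so A raises on the empty list.
def Pre_normalise_position (points : List (Int × Int × Int)) : Prop := points ≠ []
instance (points : List (Int × Int × Int)) : Decidable (Pre_normalise_position points) := by unfold Pre_normalise_position; infer_instance
def pvWitness_normalise_position : (List (Int × Int × Int)) := [(2, 3, -5), (4, 1, -5)]

def Spec_normalise_position (points : List (Int × Int × Int)) (out : List (Int × Int × Int)) : Prop := out = normalise_position_alt points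
instance (points : List (Int × Int × Int)) (out : List (Int × Int × Int)) : Decidable (Spec_normalise_position points out) := by unfold Spec_normalise_position; infer_instance

-- ===== CLAIM (what is proved, stated in full; the proofs are below) =====
def Claim_equal_normalise_position : Prop := ∀ (points : List (Int × Int × Int)), Dom_normalise_position points → Pre_normalise_position points → Spec_normalise_position points (normalise_position points)

-- ===== LEMMAS AND PROOFS =====

-- lexicographic ≤ on Int pairs
def lexle (a b : Int × Int) : Prop := a.1 ≤ b.1 ∧ (b.1 ≤ a.1 → a.2 ≤ b.2)

theorem lexle_refl (a : Int × Int) : lexle a a := ⟨le_refl _, fun _ => le_refl _⟩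

theorem lexle_trans {a b c : Int × Int} (h1 : lexle a b) (h2 : lexle b c) : lexle a c := by
  unfold lexle at *; omega

-- Python's lexicographic-min step: min2? over a two-or-more list folds its first two
-- elements into their lexicographic minimum
theorem min2?_cons_cons (x y : Int × Int) (t : List (Int × Int)) :
    PySem.List.min2? (x :: y :: t) Prod.fst Prod.snd =
      PySem.List.min2?
        ((if (decide (y.1 < x.1) || !decide (x.1 < y.1) && decide (y.2 < x.2)) = true then y else x) :: t)
        Prod.fst Prod.snd := by
  unfold PySem.List.min2?
  simp only [List.foldl_cons]
  split_ifs with h <;> rfl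

-- the lexicographic minimum characterises min2?
theorem min2_char (x : Int × Int) (t : List (Int × Int)) :
    ∃ r, PySem.List.min2? (x :: t) Prod.fst Prod.snd = some r ∧
      r ∈ x :: t ∧ ∀ q ∈ x :: t, lexle r q := by
  induction t generalizing x with
  | nil =>
    refine ⟨x, rfl, List.mem_cons_self, ?_⟩
    intro q hq
    rcases List.mem_cons.mp hq with h | h
    · exact h ▸ lexle_refl x
    · exact absurd h List.not_mem_nil
  | cons y t ih =>
    rw [min2?_cons_cons]
    by_cases hc : (decide (y.1 < x.1) || !decide (x.1 < y.1) && decide (y.2 < x.2)) = true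
    · simp only [hc, if_true]
      obtain ⟨r, hr, hmem, hall⟩ := ih y
      have hyx : lexle y x := by simp at hc; unfold lexle; omega
      refine ⟨r, hr, ?_, ?_⟩
      · rcases List.mem_cons.mp hmem with h | h
        · exact h ▸ List.mem_cons_of_mem _ List.mem_cons_self
        · exact List.mem_cons_of_mem _ (List.mem_cons_of_mem _ h)
      · intro q hq
        rcases List.mem_cons.mp hq with h | h
        · exact h ▸ lexle_trans (hall y List.mem_cons_self) hyx
        · exact hall q h
    · simp only [hc, Bool.false_eq_true, if_false]
      obtain ⟨r, hr, hmem, hall⟩ := ih x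
      have hxy : lexle x y := by simp at hc; unfold lexle; omega
      refine ⟨r, hr, ?_, ?_⟩
      · rcases List.mem_cons.mp hmem with h | h
        · exact h ▸ List.mem_cons_self
        · exact List.mem_cons_of_mem _ (List.mem_cons_of_mem _ h)
      · intro q hq
        rcases List.mem_cons.mp hq with h | h
        · exact h ▸ hall x List.mem_cons_self
        · rcases List.mem_cons.mp h with h' | h'
          · exact h' ▸ lexle_trans (hall x List.mem_cons_self) hxy
          · exact hall q (List.mem_cons_of_mem _ h')

-- min of a list shifted by a constant
theorem min?_id_map_add (l : List Int) (c : Int) :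
    PySem.List.min? (l.map (fun x => x + c)) (fun x => x) =
      (PySem.List.min? l (fun x => x)).map (fun x => x + c) := by
  cases l with
  | nil => simp [PySem.List.min?]
  | cons x t =>
    simp only [List.map_cons, PySem.List.min?_id_cons, Option.map_some]
    congr 1
    induction t generalizing x with
    | nil => simp
    | cons y t ih =>
      simp only [List.map_cons, List.foldl_cons]
      rw [min_add_add_right, ih]

theorem filter_map_translate (points : List (Int × Int × Int)) (m : Int) :
    ((translate_points points (m, -m, 0)).filter (fun p => p.2.1 == 0)).map (fun p => p.1)
      = ((points.filter (fun p => p.2.1 == m)).map (fun p => p.1)).map (fun x => x + m) := by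
  induction points with
  | nil => rfl
  | cons p t ih =>
    simp only [translate_points, List.map_cons, List.filter_cons] at *
    simp only [add_zero] at *
    by_cases h : p.2.1 = m
    · have h1 : (p.2.1 + -m == (0:Int)) = true := by simp; omega
      have h2 : (p.2.1 == m) = true := by simp [h]
      simp only [h1, h2, if_true, List.map_cons, ih]
    · have h1 : (p.2.1 + -m == (0:Int)) = false := by simp; omega
      have h2 : (p.2.1 == m) = false := by simp [h]
      simp only [h1, h2, Bool.false_eq_true, if_false]
      exact ih

-- unique minimum: if min? l id = some c and m ∈ l with m ≤ every element, then c = m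
theorem min?_id_unique {l : List Int} {c m : Int} (hc : PySem.List.min? l (fun x => x) = some c)
    (hmem : m ∈ l) (hmin : ∀ y ∈ l, m ≤ y) : c = m := by
  have h1 : m ≤ c := hmin c (PySem.List.min?_mem hc)
  have h2 : c ≤ m := PySem.List.min?_isMin hc m hmem
  omega

-- ===== VERDICT (by name: the statement is the Claim_ definition above) =====
theorem normalise_position_spec : Claim_equal_normalise_position := by
  intro points _ hpre
  unfold Spec_normalise_position normalise_position normalise_position_alt
  obtain ⟨p0, t, rfl⟩ := List.exists_cons_of_ne_nil hpre
  obtain ⟨r, hmin2c, hmem, hall⟩ := min2_char (p0.2.1, p0.1) (t.map (fun p => (p.2.1, p.1)))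
  obtain ⟨ay, ax⟩ := r
  have hmin2 : PySem.List.min2? ((p0 :: t).map (fun p => (p.2.1, p.1))) Prod.fst Prod.snd
      = some (ay, ax) := by simp only [List.map_cons]; exact hmin2c
  have hmem' : (ay, ax) ∈ (p0 :: t).map (fun p => (p.2.1, p.1)) := by
    simp only [List.map_cons]; exact hmem
  obtain ⟨p, hp, hpe⟩ := List.mem_map.mp hmem'
  have hpay : p.2.1 = ay := by simpa using congrArg Prod.fst hpe
  have hpax : p.1 = ax := by simpa using congrArg Prod.snd hpe
  have hallp : ∀ q ∈ p0 :: t, ay ≤ q.2.1 ∧ (q.2.1 ≤ ay → ax ≤ q.1) := by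
    intro q hq
    have hqmem : (q.2.1, q.1) ∈ (p0 :: t).map (fun p => (p.2.1, p.1)) :=
      List.mem_map.mpr ⟨q, hq, rfl⟩
    simp only [List.map_cons] at hqmem
    exact hall (q.2.1, q.1) hqmem
  have h1 : (PySem.List.pyGet? cube_vectors 1).getD (0, 0, 0) = ((1:Int), (-1:Int), (0:Int)) := by decide
  have h3 : (PySem.List.pyGet? cube_vectors 3).getD (0, 0, 0) = ((-1:Int), (0:Int), (1:Int)) := by decide
  -- A's first minimum equals the anchor row
  have hys : PySem.List.min? ((p0 :: t).map (fun p => p.2.1)) (fun x => x) = some ay := by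
    cases hsome : PySem.List.min? ((p0 :: t).map (fun p => p.2.1)) (fun x => x) with
    | none =>
      rw [PySem.List.min?_eq_none_iff] at hsome
      simp at hsome
    | some m' =>
      have hm : ay ∈ (p0 :: t).map (fun p => p.2.1) := List.mem_map.mpr ⟨p, hp, hpay⟩
      have hmn : ∀ y ∈ (p0 :: t).map (fun p => p.2.1), ay ≤ y := by
        intro y hy
        obtain ⟨q, hq, rfl⟩ := List.mem_map.mp hy
        exact (hallp q hq).1
      rw [min?_id_unique hsome hm hmn]
  -- A's second minimum equals the anchor column
  have hxs : PySem.List.min? (((p0 :: t).filter (fun p => p.2.1 == ay)).map (fun p => p.1)) (fun x => x) = some ax := by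
    cases hsome : PySem.List.min? (((p0 :: t).filter (fun p => p.2.1 == ay)).map (fun p => p.1)) (fun x => x) with
    | none =>
      rw [PySem.List.min?_eq_none_iff] at hsome
      exfalso
      have : p.1 ∈ ((p0 :: t).filter (fun p => p.2.1 == ay)).map (fun p => p.1) :=
        List.mem_map.mpr ⟨p, List.mem_filter.mpr ⟨hp, by simp [hpay]⟩, rfl⟩
      rw [hsome] at this
      exact List.not_mem_nil this
    | some m' =>
      have hm : ax ∈ ((p0 :: t).filter (fun p => p.2.1 == ay)).map (fun p => p.1) :=
        List.mem_map.mpr ⟨p, List.mem_filter.mpr ⟨hp, by simp [hpay]⟩, hpax⟩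
      have hmn : ∀ y ∈ ((p0 :: t).filter (fun p => p.2.1 == ay)).map (fun p => p.1), ax ≤ y := by
        intro y hy
        obtain ⟨q, hq, rfl⟩ := List.mem_map.mp hy
        obtain ⟨hq1, hq2⟩ := List.mem_filter.mp hq
        have hqy : q.2.1 = ay := by simpa using hq2
        exact (hallp q hq1).2 (le_of_eq hqy)
      rw [min?_id_unique hsome hm hmn]
  simp only [h1, h3, scalar_multiply, one_mul, zero_mul, neg_one_mul, hys, Option.getD_some,
    hmin2]
  rw [filter_map_translate (p0 :: t) ay, min?_id_map_add, hxs]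
  simp only [Option.map_some, Option.getD_some]
  unfold translate_points
  simp only [List.map_map]
  apply List.map_congr_left
  intro q _
  simp only [Function.comp]
  refine Prod.ext ?_ (Prod.ext ?_ ?_) <;> simp <;> ring
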